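-- pv_equiv track=rewrite | github.com/Frank-py/Japy | src/Python/versch.py | versch
-- ===== SOURCE A (Python) =====
-- def versch(Nachricht, key):
--     key = str(bin(int(key)))[2:]
--     if isinstance(Nachricht, list):
--         Nachricht = "".join([i for i in Nachricht])
--     Nachricht = str(Nachricht)
--     if len(Nachricht) > len(key):
--         while len(Nachricht) > len(key):
--             key *= 2
--
--     key = list(key)
--     Nachricht = list(Nachricht)
--     stra = ""
--     for i in range(len(Nachricht)):
--         if Nachricht[i] == key[i]:
--             stra += "0"
--         else:
--             stra += "1"
--     return "".join(stra)
-- ===== SOURCE B (Python) =====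
-- def versch(Nachricht, key):
--     key = str(bin(int(key)))[2:]
--     if isinstance(Nachricht, list):
--         Nachricht = "".join([i for i in Nachricht])
--     Nachricht = str(Nachricht)
--     m = len(Nachricht)
--     n = len(key)
--     out = ["1"] * m
--     for j, kc in enumerate(key):
--         for i in range(j, m, n):
--             if Nachricht[i] == kc:
--                 out[i] = "0"
--     return "".join(out)
-- ===== Notes on version B (the rewrite author's own statement) =====
-- stated objective: alternative
-- what changed: Instead of doubling the key until it covers the message and scanning left-to-right with string += accumulation, B preallocates an all-'1' output array and, for each key position j, walks the strided message positions j, j+n, j+2n, ... (range(j, m, n)) clearing matching positions to '0' - a residue-class (column-wise) traversal with in-place writes.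
import Mathlib
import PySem

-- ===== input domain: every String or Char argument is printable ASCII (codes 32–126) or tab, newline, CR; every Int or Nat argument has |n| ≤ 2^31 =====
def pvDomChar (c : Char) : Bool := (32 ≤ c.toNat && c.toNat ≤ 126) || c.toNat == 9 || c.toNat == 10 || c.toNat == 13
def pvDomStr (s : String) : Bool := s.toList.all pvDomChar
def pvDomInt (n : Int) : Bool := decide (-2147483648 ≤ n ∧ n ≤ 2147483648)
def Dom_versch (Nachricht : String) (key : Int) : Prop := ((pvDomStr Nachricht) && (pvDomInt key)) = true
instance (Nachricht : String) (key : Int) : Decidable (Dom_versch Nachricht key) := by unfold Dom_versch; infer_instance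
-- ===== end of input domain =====

-- B builds the output by RESIDUE CLASSES: it preallocates an all-'1' output array and, for
-- each key position j, walks the strided positions j, j+n, j+2n, … of the message, clearing
-- the matching ones to '0' — instead of A's key-doubling loop plus one left-to-right pass.

-- shared helper: Python's str(bin(int(key)))[2:].  bin(n) = '0b'+digits for n ≥ 0
-- ('0b0' for 0), '-0b'+digits for n < 0, so [2:] is the digits resp. 'b'+digits.
def binDigits : Nat → List Char
  | 0 => []
  | n+1 => binDigits ((n+1)/2) ++ [if (n+1) % 2 = 1 then '1' else '0']

def keyChars (key : Int) : List Char :=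
  if key < 0 then 'b' :: binDigits (-key).toNat
  else if key = 0 then ['0']
  else binDigits key.toNat

-- ===== PORT A =====
-- A's 'while len(Nachricht) > len(key): key *= 2'.  The 'k ≠ []' conjunct is only a
-- totality guard (keyChars is never empty); it changes nothing on reachable inputs.
def growKey (n : Nat) (k : List Char) : List Char :=
  if _h : k.length < n ∧ k ≠ [] then growKey n (k ++ k) else k
termination_by n - k.length
decreasing_by
  simp only [List.length_append]
  rcases _h with ⟨h1, h2⟩
  have : 0 < k.length := List.length_pos_iff.mpr h2
  omega

def versch (Nachricht : String) (key : Int) : String :=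
  let k0 := keyChars key
  let ns := Nachricht.toList
  let k := growKey ns.length k0
  String.mk ((List.range ns.length).foldl
    (fun s i => s ++ [if ns.getD i ' ' == k.getD i ' ' then '0' else '1']) [])

-- ===== PORT B =====
-- 'out = ["1"] * m; for j, kc in enumerate(key): for i in range(j, m, n): if N[i]==kc: out[i]="0"'
def versch_alt (Nachricht : String) (key : Int) : String :=
  let k := keyChars key
  let ns := Nachricht.toList
  let m := ns.length
  let n := k.length
  String.mk ((PySem.List.enumerate k 0).foldl
    (fun out ji =>
      (PySem.List.pyRange ji.1 (m : Int) (n : Int)).foldl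
        (fun o i => if ns.getD i.toNat ' ' == ji.2 then PySem.List.pySetD o i '0' else o) out)
    (List.replicate m '1'))

-- ===== PRECONDITION & SPEC =====
def Spec_versch (Nachricht : String) (key : Int) (out : String) : Prop := out = versch_alt Nachricht key
instance (Nachricht : String) (key : Int) (out : String) : Decidable (Spec_versch Nachricht key out) := by unfold Spec_versch; infer_instance

-- ===== CLAIM (what is proved, stated in full; the proofs are below) =====
def Claim_equal_versch : Prop := ∀ (Nachricht : String) (key : Int), Dom_versch Nachricht key → Spec_versch Nachricht key (versch Nachricht key)

-- ===== LEMMAS AND PROOFS =====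

lemma binDigits_ne_nil (n : Nat) (h : n ≠ 0) : binDigits n ≠ [] := by
  cases n with
  | zero => exact absurd rfl h
  | succ m => unfold binDigits; simp

lemma keyChars_ne_nil (key : Int) : keyChars key ≠ [] := by
  unfold keyChars
  split_ifs with h1 h2
  · simp
  · simp
  · exact binDigits_ne_nil _ (by omega)

-- ===== A-side: the doubled key read cyclically =====
lemma getD_append_self (k : List Char) (j : Nat) (hj : j < 2 * k.length) (d : Char) :
    (k ++ k).getD j d = k.getD (j % k.length) d := by
  rcases Nat.lt_or_ge j k.length with h | h
  · rw [Nat.mod_eq_of_lt h, List.getD_eq_getElem?_getD, List.getD_eq_getElem?_getD,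
        List.getElem?_append_left h]
  · have hne : k.length ≠ 0 := by omega
    have : j % k.length = j - k.length := by
      rw [Nat.mod_eq_sub_mod h, Nat.mod_eq_of_lt (by omega)]
    rw [this, List.getD_eq_getElem?_getD, List.getD_eq_getElem?_getD,
        List.getElem?_append_right h]

lemma growKey_getD (d : Char) (n : Nat) (k : List Char) :
    k ≠ [] → ∀ i, i < n → (growKey n k).getD i d = k.getD (i % k.length) d := by
  induction k using growKey.induct (n := n) with
  | case1 k h ih =>
    intro hk i hi
    rw [growKey.eq_def, dif_pos h]
    have hm : 0 < k.length := List.length_pos_iff.mpr h.2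
    have h2 : (k ++ k) ≠ [] := by simp [h.2]
    rw [ih h2 i hi]
    have hlt : i % (k ++ k).length < 2 * k.length := by
      have := Nat.mod_lt i (y := (k ++ k).length) (by simp [List.length_append]; omega)
      simpa [List.length_append, two_mul] using this
    rw [getD_append_self k _ hlt d]
    congr 1
    simp only [List.length_append]
    rw [← two_mul]
    exact Nat.mod_mod_of_dvd i ⟨2, by ring⟩
  | case2 k h =>
    intro hk i hi
    rw [growKey.eq_def, dif_neg h]
    have hlen : n ≤ k.length := by
      by_contra hc
      push_neg at hc
      exact h ⟨hc, hk⟩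
    rw [Nat.mod_eq_of_lt (by omega)]

-- ===== B-side: the strided clearing pass, characterised pointwise =====

lemma inner_length (ns : List Char) (kc : Char) (idxs : List Int) (out : List Char) :
    (idxs.foldl (fun o i => if ns.getD i.toNat ' ' == kc then PySem.List.pySetD o i '0' else o) out).length
      = out.length := by
  induction idxs generalizing out with
  | nil => rfl
  | cons x rest ih =>
    simp only [List.foldl_cons]
    rw [ih]
    split_ifs <;> simp [PySem.List.length_pySetD]

lemma inner_getD (ns : List Char) (kc d : Char) (idxs : List Int)
    (hn : ∀ i ∈ idxs, 0 ≤ i) (out : List Char) (t : Nat) (ht : t < out.length) :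
    (idxs.foldl (fun o i => if ns.getD i.toNat ' ' == kc then PySem.List.pySetD o i '0' else o) out).getD t d
      = if ((t : Int) ∈ idxs ∧ ns.getD t ' ' == kc) then '0' else out.getD t d := by
  induction idxs generalizing out with
  | nil => simp
  | cons x rest ih =>
    have hx : 0 ≤ x := hn x (by simp)
    have hrest : ∀ i ∈ rest, 0 ≤ i := fun i hi => hn i (by simp [hi])
    simp only [List.foldl_cons]
    have hstepLen : ∀ o : List Char,
        ((if ns.getD x.toNat ' ' == kc then PySem.List.pySetD o x '0' else o)).length = o.length := by
      intro o; split_ifs <;> simp [PySem.List.length_pySetD]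
    rw [ih hrest _ (by rw [hstepLen]; exact ht)]
    by_cases hxt : x = (t : Int)
    · have hxn : x.toNat = t := by omega
      by_cases heq : (ns.getD t ' ' == kc) = true
      · have hval : ((if ns.getD x.toNat ' ' == kc then PySem.List.pySetD out x '0' else out)).getD t d = '0' := by
          rw [hxn, if_pos heq, PySem.List.pySetD_of_nonneg _ _ hx, hxn,
              List.getD_eq_getElem?_getD, List.getElem?_set_self (by omega)]
          rfl
        rw [if_pos (⟨by simp [hxt], heq⟩ : ((t : Int) ∈ x :: rest ∧ (ns.getD t ' ' == kc) = true))]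
        by_cases hmem : (t : Int) ∈ rest
        · rw [if_pos ⟨hmem, heq⟩]
        · rw [if_neg (by rintro ⟨h, _⟩; exact hmem h), hval]
      · have hval : (if ns.getD x.toNat ' ' == kc then PySem.List.pySetD out x '0' else out) = out := by
          rw [hxn, if_neg heq]
        rw [hval, if_neg (by rintro ⟨_, h⟩; exact heq h),
            if_neg (by rintro ⟨_, h⟩; exact heq h)]
    · have hval : ((if ns.getD x.toNat ' ' == kc then PySem.List.pySetD out x '0' else out)).getD t d
          = out.getD t d := by
        split_ifs with h
        · rw [PySem.List.pySetD_of_nonneg _ _ hx, List.getD_eq_getElem?_getD,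
              List.getElem?_set_ne (by omega), ← List.getD_eq_getElem?_getD]
        · rfl
      rw [hval]
      by_cases hm : (t : Int) ∈ rest
      · have hm2 : (t : Int) ∈ x :: rest := List.mem_cons_of_mem _ hm
        simp [hm, hm2]
      · have hm2 : ¬((t : Int) ∈ x :: rest) := by
          simp only [List.mem_cons]
          rintro (h | h)
          · exact hxt h.symm
          · exact hm h
        simp [hm, hm2]

lemma mem_stride (t j0 m n : Nat) (hj : j0 < n) (ht : t < m) :
    ((t : Int) ∈ PySem.List.pyRange (j0 : Int) (m : Int) (n : Int)) ↔ t % n = j0 := by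
  rw [PySem.List.mem_pyRange_iff_of_pos (by exact_mod_cast Nat.zero_lt_of_lt hj)]
  constructor
  · rintro ⟨h1, h2, q, hq⟩
    have hn0 : (0 : Int) < n := by exact_mod_cast Nat.zero_lt_of_lt hj
    have hx : 0 ≤ (n : Int) * q := by omega
    have hq0 : 0 ≤ q := (mul_nonneg_iff_of_pos_left hn0).mp hx
    have hqn : q = (q.toNat : Int) := (Int.toNat_of_nonneg hq0).symm
    have ht' : t = j0 + n * q.toNat := by
      have h5 : (t : Int) = j0 + (n : Int) * (q.toNat : Int) := by rw [← hqn]; omega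
      exact_mod_cast h5
    rw [ht', Nat.add_mul_mod_self_left, Nat.mod_eq_of_lt hj]
  · intro h
    have hnat := Nat.div_add_mod t n
    rw [h] at hnat
    have hcast : ((n * (t / n) : Nat) : Int) = (n : Int) * ((t / n : Nat) : Int) := by push_cast; ring
    have hn2 : ((n * (t / n) : Nat) : Int) + j0 = t := by exact_mod_cast hnat
    refine ⟨by omega, by exact_mod_cast ht, ((t / n : Nat) : Int), ?_⟩
    rw [← hcast]
    omega

lemma outer_getD (ns : List Char) (m n : Nat) (d : Char) :
    ∀ (k' : List Char) (j0 : Nat) (out : List Char), out.length = m → j0 + k'.length ≤ n →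
    ∀ t, t < m →
    ((PySem.List.enumerate k' (j0 : Int)).foldl
      (fun out ji =>
        (PySem.List.pyRange ji.1 (m : Int) (n : Int)).foldl
          (fun o i => if ns.getD i.toNat ' ' == ji.2 then PySem.List.pySetD o i '0' else o) out)
      out).getD t d
      = if (j0 ≤ t % n ∧ t % n < j0 + k'.length ∧ ns.getD t ' ' == k'.getD (t % n - j0) ' ')
        then '0' else out.getD t d := by
  intro k'
  induction k' with
  | nil =>
    intro j0 out hout _ t ht
    rw [PySem.List.enumerate_nil]
    simp only [List.foldl_nil, List.length_nil, Nat.add_zero]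
    rw [if_neg]
    rintro ⟨h1, h2, _⟩
    omega
  | cons kc rest ih =>
    intro j0 out hout hle t ht
    have hj0n : j0 < n := by simp at hle; omega
    rw [PySem.List.enumerate_cons]
    simp only [List.foldl_cons]
    have hnonneg : ∀ i ∈ PySem.List.pyRange (j0 : Int) (m : Int) (n : Int), 0 ≤ i := by
      intro i hi
      rw [PySem.List.mem_pyRange_iff_of_pos (by exact_mod_cast Nat.zero_lt_of_lt hj0n)] at hi
      omega
    set out1 := (PySem.List.pyRange ((j0 : Int)) (m : Int) (n : Int)).foldl
        (fun o i => if ns.getD i.toNat ' ' == kc then PySem.List.pySetD o i '0' else o) out with hout1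
    have hlen1 : out1.length = m := by rw [hout1, inner_length, hout]
    have hjcast : ((j0 : Int) + 1) = ((j0 + 1 : Nat) : Int) := by push_cast; ring
    rw [hjcast, ih (j0 + 1) out1 hlen1 (by simp at hle ⊢; omega) t ht]
    have hval1 : out1.getD t d
        = if (t % n = j0 ∧ ns.getD t ' ' == kc) then '0' else out.getD t d := by
      rw [hout1, inner_getD ns kc d _ hnonneg out t (by omega)]
      by_cases hmod : t % n = j0
      · simp [(mem_stride t j0 m n hj0n ht).mpr hmod, hmod]
      · have hnm : ¬ ((t : Int) ∈ PySem.List.pyRange (j0 : Int) (m : Int) (n : Int)) := by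
          rw [mem_stride t j0 m n hj0n ht]; exact hmod
        simp [hnm, hmod]
    rw [hval1]
    by_cases hmod : t % n = j0
    · have c1 : ¬(j0 + 1 ≤ j0) := by omega
      have c3 : j0 < j0 + (rest.length + 1) := by omega
      simp [hmod, Nat.sub_self, List.length_cons, c1, c3]
    · by_cases hge : j0 + 1 ≤ t % n
      · have hsub : t % n - j0 = (t % n - (j0 + 1)) + 1 := by omega
        have hga : (j0 + 1 ≤ t % n) ↔ (j0 ≤ t % n) := by omega
        have hb : (t % n < j0 + 1 + rest.length) ↔ (t % n < j0 + (rest.length + 1)) := by omega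
        simp [hsub, List.getD_cons_succ, List.length_cons, hmod, hga, hb]
      · have c1 : ¬(j0 + 1 ≤ t % n) := hge
        have c2 : ¬(j0 ≤ t % n) := by omega
        simp [List.length_cons, c1, c2, hmod]

lemma outer_length (ns : List Char) (m n : Nat) (k' : List Char) (j0 : Int) (out : List Char) :
    ((PySem.List.enumerate k' j0).foldl
      (fun out ji =>
        (PySem.List.pyRange ji.1 (m : Int) (n : Int)).foldl
          (fun o i => if ns.getD i.toNat ' ' == ji.2 then PySem.List.pySetD o i '0' else o) out)
      out).length = out.length := by
  induction k' generalizing j0 out with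
  | nil => simp [PySem.List.enumerate_nil]
  | cons kc rest ih =>
    rw [PySem.List.enumerate_cons]
    simp only [List.foldl_cons]
    rw [ih, inner_length]

theorem versch_spec : Claim_equal_versch := by
  unfold Claim_equal_versch Spec_versch
  intro N key _
  unfold versch versch_alt
  simp only
  congr 1
  rw [PySem.List.foldl_append_singleton_eq_map]
  simp only [List.nil_append]
  set ns := N.toList with hns
  set k := keyChars key with hkey
  have hk : k ≠ [] := keyChars_ne_nil key
  have hkpos : 0 < k.length := List.length_pos_iff.mpr hk
  apply List.ext_getElem
  · rw [outer_length]; simp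
  · intro t h1 h2
    have ht : t < ns.length := by simpa using h1
    have hB : ((PySem.List.enumerate k 0).foldl
        (fun out ji =>
          (PySem.List.pyRange ji.1 (ns.length : Int) (k.length : Int)).foldl
            (fun o i => if ns.getD i.toNat ' ' == ji.2 then PySem.List.pySetD o i '0' else o) out)
        (List.replicate ns.length '1')).getD t ' '
        = (if ns.getD t ' ' == k.getD (t % k.length) ' ' then '0' else '1') := by
      have h0 : ((0 : Nat) : Int) = (0 : Int) := rfl
      rw [← h0, outer_getD ns ns.length k.length ' ' k 0 (List.replicate ns.length '1')
            (by simp) (by omega) t ht]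
      have hmn : t % k.length < k.length := Nat.mod_lt t hkpos
      by_cases heq : (ns.getD t ' ' == k.getD (t % k.length) ' ') = true
      · rw [if_pos ⟨Nat.zero_le _, by omega, by simpa using heq⟩, if_pos heq]
      · rw [if_neg (by rintro ⟨_, _, h⟩; exact heq (by simpa using h)), if_neg heq]
        rw [List.getD_eq_getElem?_getD, List.getElem?_replicate, if_pos ht]
        rfl
    rw [← List.getD_eq_getElem _ ' ' h2, hB]
    simp only [List.getElem_map, List.getElem_range]
    rw [growKey_getD ' ' ns.length k hk t ht]
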